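-- pv_equiv track=rewrite | github.com/salisburytristan-arch/DataAI | packages/core/src/trinary_gates.py | bytes_to_trits
-- ===== SOURCE A (Python) =====
-- from typing import Tuple, List
--
-- def bytes_to_trits(data: bytes) -> List[int]:
--     """
--     Convert byte sequence to trits.
--     Each byte (0-255) → 5 trits (since 3^5 = 243 < 256 < 729 = 3^6).
--     Uses greedy encoding.
--     """
--     trits = []
--     for byte_val in data:
--         # Convert byte to base-3 (5 trits)
--         remaining = byte_val
--         byte_trits = []
--         for _ in range(5):
--             byte_trits.insert(0, remaining % 3)
--             remaining //= 3
--         trits.extend(byte_trits)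
--     return trits
-- ===== SOURCE B (Python) =====
-- from typing import Tuple, List
--
-- _TABLE = None
--
-- def _build_table():
--     """243 rows built by base-3 odometer increments: row(v+1) = row(v) + 1 with carry."""
--     rows = [[0, 0, 0, 0, 0]]
--     for _ in range(242):
--         row = rows[-1][:]
--         i = 4
--         while row[i] == 2:
--             row[i] = 0
--             i -= 1
--         row[i] += 1
--         rows.append(row)
--     return rows
--
-- def bytes_to_trits(data: bytes) -> List[int]:
--     """Each byte -> its 5-trit row, looked up (mod 3^5) in a table built once by counting in base 3."""
--     global _TABLE
--     if _TABLE is None: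
--         _TABLE = _build_table()
--     out = []
--     for b in data:
--         out.extend(_TABLE[b % 243])
--     return out
-- ===== Notes on version B (the rewrite author's own statement) =====
-- stated objective: faster
-- what changed: Replaces A's per-byte 5-step remainder/insert(0) conversion by a 243-row lookup table built once by base-3 odometer increments (counting with carry, no division in the table build), followed by a single lookup-and-extend pass indexed by b % 243.
import Mathlib
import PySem

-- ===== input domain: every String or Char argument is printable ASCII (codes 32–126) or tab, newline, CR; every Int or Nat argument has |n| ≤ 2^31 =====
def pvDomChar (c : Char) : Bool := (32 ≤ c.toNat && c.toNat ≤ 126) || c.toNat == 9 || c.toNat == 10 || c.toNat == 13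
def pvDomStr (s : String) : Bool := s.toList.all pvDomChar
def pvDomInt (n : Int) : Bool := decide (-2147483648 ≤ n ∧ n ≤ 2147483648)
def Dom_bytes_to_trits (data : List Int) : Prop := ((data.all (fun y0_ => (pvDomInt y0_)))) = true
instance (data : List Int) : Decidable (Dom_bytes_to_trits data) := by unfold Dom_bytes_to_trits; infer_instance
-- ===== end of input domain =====

-- B replaces A's per-byte remainder/prepend conversion by a 243-row table built once by
-- base-3 odometer increments (counting with carry, no division), then one lookup pass (mod 3^5).

-- ===== PORT A =====
def bytes_to_trits (data : List Int) : List Int :=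
  data.foldl (fun trits byte_val =>
    let st := (PySem.List.pyRange 0 5 1).foldl
      (fun (st : Int × List Int) _ =>
        (PySem.Int.floordiv st.1 3, PySem.List.insert st.2 0 (PySem.Int.mod st.1 3)))
      (byte_val, ([] : List Int))
    trits ++ st.2) []

-- ===== PORT B =====
-- the `while row[i] == 2` back-scan of Source B, transliterated as structural recursion
-- over the reversed row (scan from the last index; exact on the rows reached here,
-- none of which is all-2s)
def pvIncRev : List Int → List Int
  | [] => []
  | t :: rest => if t == 2 then 0 :: pvIncRev rest else (t + 1) :: rest

def pvIncRow (row : List Int) : List Int := (pvIncRev row.reverse).reverse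

-- _build_table of Source B: 242 increments of the last row, appended
def pvTable : List (List Int) :=
  (PySem.List.pyRange 0 242 1).foldl
    (fun rows _ =>
      rows ++ [pvIncRow ((PySem.List.pyGet? rows (-1)).getD [])])
    [[0, 0, 0, 0, 0]]

def bytes_to_trits_alt (data : List Int) : List Int :=
  data.foldl (fun out b =>
    out ++ (PySem.List.pyGet? pvTable (PySem.Int.mod b 243)).getD []) []

-- ===== PRECONDITION & SPEC =====
def Spec_bytes_to_trits (data : List Int) (out : List Int) : Prop := out = bytes_to_trits_alt data
instance (data : List Int) (out : List Int) : Decidable (Spec_bytes_to_trits data out) := by unfold Spec_bytes_to_trits; infer_instance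

-- ===== CLAIM (what is proved, stated in full; the proofs are below) =====
def Claim_equal_bytes_to_trits : Prop := ∀ (data : List Int), Dom_bytes_to_trits data → Spec_bytes_to_trits data (bytes_to_trits data)

-- ===== LEMMAS AND PROOFS =====

-- A's inner 5-step conversion loop, as a named function (proof-only helper)
def pvRowA (v : Int) : List Int :=
  ((PySem.List.pyRange 0 5 1).foldl
    (fun (st : Int × List Int) _ =>
      (PySem.Int.floordiv st.1 3, PySem.List.insert st.2 0 (PySem.Int.mod st.1 3)))
    (v, ([] : List Int))).2

-- closed form of A's inner loop (proof-only)
def pvRowC (v : Int) : List Int :=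
  [(v / 81) % 3, (v / 27) % 3, (v / 9) % 3, (v / 3) % 3, v % 3]

theorem pvRowA_eq_rowC (v : Int) : pvRowA v = pvRowC v := by
  have h3 : (0:Int) < 3 := by norm_num
  have h9 : (0:Int) < 9 := by norm_num
  have h27 : (0:Int) < 27 := by norm_num
  have h81 : (0:Int) < 81 := by norm_num
  have hrange : PySem.List.pyRange 0 5 1 = [0, 1, 2, 3, 4] := by decide
  unfold pvRowA pvRowC
  simp only [hrange, List.foldl, PySem.List.insert_zero,
    PySem.Int.floordiv_eq_ediv_of_pos h3, PySem.Int.mod_eq_emod_of_pos h3]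
  simp only [List.cons.injEq, and_true]
  omega

-- the odometer table agrees, entry by entry, with the base-3 digit rows of 0..242
set_option maxRecDepth 100000 in
theorem pvTable_eq : pvTable = (PySem.List.pyRange 0 243 1).map pvRowC := by decide

-- digits depend only on v mod 3^5
theorem pvRowC_emod (v : Int) : pvRowC (v % 243) = pvRowC v := by
  unfold pvRowC
  simp only [List.cons.injEq, and_true]
  omega

theorem pvLookup_eq (v : Int) :
    (PySem.List.pyGet? pvTable (PySem.Int.mod v 243)).getD [] = pvRowA v := by
  have hm : PySem.Int.mod v 243 = v % 243 :=
    PySem.Int.mod_eq_emod_of_pos (by norm_num)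
  have h0 : 0 ≤ v % 243 := Int.emod_nonneg v (by norm_num)
  have h1 : v % 243 < 243 := Int.emod_lt_of_pos v (by norm_num)
  show PySem.List.pyGetD pvTable (PySem.Int.mod v 243) [] = pvRowA v
  rw [hm, pvTable_eq,
    PySem.List.pyGetD_map_pyRange_of_nonneg pvRowC 243 (v % 243) [] h0 h1,
    pvRowC_emod, pvRowA_eq_rowC]

-- ===== VERDICT (by name: the statement is the Claim_ definition above) =====
theorem bytes_to_trits_spec : Claim_equal_bytes_to_trits := by
  intro data hdom
  unfold Spec_bytes_to_trits bytes_to_trits bytes_to_trits_alt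
  induction data using List.reverseRecOn with
  | nil => rfl
  | append_singleton rest b ih =>
    have hrest : Dom_bytes_to_trits rest := by
      unfold Dom_bytes_to_trits at *
      simp_all [List.all_append]
    simp only [List.foldl_append, List.foldl_cons, List.foldl_nil]
    rw [ih hrest, pvLookup_eq b]
    rfl
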